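-- pv_equiv track=rewrite | github.com/jonahgaudet/Advent | Day 12 Rain Risk.py | rotateWaypoint
-- ===== SOURCE A (Python) =====
-- def rotateWaypoint(waypointX, waypointY, command, value):
--     shifts = int(value/90)
--     for i in range(0, shifts):
--         if command == "L":
--             if waypointY * waypointX > 0:
--                 temp = waypointY
--                 waypointY = waypointX
--                 waypointX = temp * -1
--             else:
--                 temp = waypointX
--                 waypointX = waypointY * -1
--                 waypointY = temp
--         if command == "R":
--             if waypointY * waypointX > 0:
--                 temp = waypointY
--                 waypointY = waypointX * -1
--                 waypointX = temp * 1
--             else: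
--                 temp = waypointY
--                 waypointY = waypointX * -1
--                 waypointX = temp
--     return waypointX, waypointY
-- ===== SOURCE B (Python) =====
-- def rotateWaypoint(waypointX, waypointY, command, value):
--     # Closed form: both of A's inner branches are identical, so each step is a
--     # fixed 90-degree rotation; apply shifts % 4 of them directly.
--     shifts = int(value / 90)
--     k = shifts % 4 if shifts > 0 else 0
--     if command == "L":
--         table = [(waypointX, waypointY), (-waypointY, waypointX),
--                  (-waypointX, -waypointY), (waypointY, -waypointX)]
--         return table[k]
--     if command == "R":
--         table = [(waypointX, waypointY), (waypointY, -waypointX),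
--                  (-waypointX, -waypointY), (-waypointY, waypointX)]
--         return table[k]
--     return waypointX, waypointY
-- ===== Notes on version B (the rewrite author's own statement) =====
-- stated objective: simpler
-- what changed: Replaced A's per-90-degrees loop (with two redundant identical inner branches) by a closed form: k = shifts % 4 indexes a 4-entry rotation table directly.
import Mathlib
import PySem

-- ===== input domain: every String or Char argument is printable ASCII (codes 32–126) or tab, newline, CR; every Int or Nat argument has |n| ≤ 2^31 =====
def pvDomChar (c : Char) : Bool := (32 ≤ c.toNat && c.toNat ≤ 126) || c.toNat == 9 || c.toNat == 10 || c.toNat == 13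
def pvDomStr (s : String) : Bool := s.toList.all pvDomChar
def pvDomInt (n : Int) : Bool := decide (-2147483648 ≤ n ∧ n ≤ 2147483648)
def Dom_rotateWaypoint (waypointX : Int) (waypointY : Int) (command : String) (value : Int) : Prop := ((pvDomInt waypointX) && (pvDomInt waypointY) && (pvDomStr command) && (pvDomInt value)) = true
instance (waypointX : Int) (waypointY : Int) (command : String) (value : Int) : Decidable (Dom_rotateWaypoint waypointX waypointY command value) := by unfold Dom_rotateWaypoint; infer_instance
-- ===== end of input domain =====

-- B replaces A's per-90-degrees loop by a closed-form 4-entry rotation table (objective: simpler).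

-- ===== PORT A =====
-- literal port: shifts = int(value/90) truncates toward zero = Int.tdiv; the loop body
-- keeps A's redundant sign-test branches exactly as written
def rotateWaypoint (waypointX : Int) (waypointY : Int) (command : String) (value : Int) : Int × Int :=
  let shifts := value.tdiv 90
  (PySem.List.pyRange 0 shifts 1).foldl
    (fun p _ =>
      let p := if command = "L" then
          (if p.2 * p.1 > 0 then (p.2 * (-1), p.1) else (p.2 * (-1), p.1))
        else p
      if command = "R" then
          (if p.2 * p.1 > 0 then (p.2 * 1, p.1 * (-1)) else (p.2, p.1 * (-1)))
        else p)
    (waypointX, waypointY)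

-- ===== PORT B =====
-- port of Source B: closed form, k = shifts % 4 indexes a 4-entry table (index is always in
-- range, so the .getD default is never used — table[k] cannot raise)
def rotateWaypoint_alt (waypointX : Int) (waypointY : Int) (command : String) (value : Int) : Int × Int :=
  let shifts := value.tdiv 90
  let k : Int := if shifts > 0 then shifts % 4 else 0
  if command = "L" then
    (PySem.List.pyGet? [(waypointX, waypointY), (-waypointY, waypointX),
                        (-waypointX, -waypointY), (waypointY, -waypointX)] k).getD (waypointX, waypointY)
  else if command = "R" then
    (PySem.List.pyGet? [(waypointX, waypointY), (waypointY, -waypointX),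
                        (-waypointX, -waypointY), (-waypointY, waypointX)] k).getD (waypointX, waypointY)
  else (waypointX, waypointY)

-- ===== PRECONDITION & SPEC =====
def Spec_rotateWaypoint (waypointX : Int) (waypointY : Int) (command : String) (value : Int) (out : Int × Int) : Prop := out = rotateWaypoint_alt waypointX waypointY command value
instance (waypointX : Int) (waypointY : Int) (command : String) (value : Int) (out : Int × Int) : Decidable (Spec_rotateWaypoint waypointX waypointY command value out) := by unfold Spec_rotateWaypoint; infer_instance

-- ===== CLAIM (what is proved, stated in full; the proofs are below) =====
def Claim_equal_rotateWaypoint : Prop := ∀ (waypointX : Int) (waypointY : Int) (command : String) (value : Int), Dom_rotateWaypoint waypointX waypointY command value → Spec_rotateWaypoint waypointX waypointY command value (rotateWaypoint waypointX waypointY command value)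

-- ===== LEMMAS AND PROOFS =====

-- a fold whose body ignores the list element is an iterate of the step
theorem foldl_const_step {α β : Type} (f : β → β) (l : List α) (init : β) :
    l.foldl (fun p _ => f p) init = f^[l.length] init := by
  induction l generalizing init with
  | nil => rfl
  | cons a t ih => simp [List.foldl, ih, Function.iterate_succ_apply]

theorem foldl_id {α β : Type} (l : List α) (init : β) :
    l.foldl (fun p _ => p) init = init := by
  induction l generalizing init with
  | nil => rfl
  | cons a t ih => simp [List.foldl, ih]

def rotL (p : Int × Int) : Int × Int := (-p.2, p.1)
def rotR (p : Int × Int) : Int × Int := (p.2, -p.1)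

theorem rotL_iterate (n : Nat) (x y : Int) :
    rotL^[n] (x, y) =
      if n % 4 = 0 then (x, y) else if n % 4 = 1 then (-y, x)
      else if n % 4 = 2 then (-x, -y) else (y, -x) := by
  induction n with
  | zero => simp
  | succ n ih =>
    rw [Function.iterate_succ_apply', ih]
    have h4 : n % 4 = 0 ∨ n % 4 = 1 ∨ n % 4 = 2 ∨ n % 4 = 3 := by omega
    rcases h4 with h | h | h | h <;>
      simp [h, rotL, show (n+1) % 4 = (n % 4 + 1) % 4 from by omega]

theorem rotR_iterate (n : Nat) (x y : Int) :
    rotR^[n] (x, y) =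
      if n % 4 = 0 then (x, y) else if n % 4 = 1 then (y, -x)
      else if n % 4 = 2 then (-x, -y) else (-y, x) := by
  induction n with
  | zero => simp
  | succ n ih =>
    rw [Function.iterate_succ_apply', ih]
    have h4 : n % 4 = 0 ∨ n % 4 = 1 ∨ n % 4 = 2 ∨ n % 4 = 3 := by omega
    rcases h4 with h | h | h | h <;>
      simp [h, rotR, show (n+1) % 4 = (n % 4 + 1) % 4 from by omega]

-- ===== VERDICT (by name: the statement is the Claim_ definition above) =====
theorem rotateWaypoint_spec : Claim_equal_rotateWaypoint := by
  intro x y c v _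
  unfold Spec_rotateWaypoint rotateWaypoint rotateWaypoint_alt
  set s := v.tdiv 90 with hs
  have hlen : (PySem.List.pyRange 0 s 1).length = s.toNat := by
    simp [PySem.List.length_pyRange_one]
  by_cases hL : c = "L"
  · subst hL
    simp only [String.reduceEq, ite_self, if_true, if_false]
    rw [show (fun (p : Int × Int) (_ : Int) => ((p.2 * (-1), p.1) : Int × Int)) =
          (fun (p : Int × Int) (_ : Int) => rotL p) from
        funext fun p => funext fun _ => by simp [rotL]]
    rw [foldl_const_step, hlen, rotL_iterate]
    by_cases hp : s > 0
    · have hm : s.toNat % 4 = (s % 4).toNat := by omega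
      rw [if_pos hp, hm]
      have h4 : s % 4 = 0 ∨ s % 4 = 1 ∨ s % 4 = 2 ∨ s % 4 = 3 := by omega
      rcases h4 with h | h | h | h <;>
        simp [h, PySem.List.pyGet?, PySem.List.pyIdx?]
    · rw [if_neg hp]
      have hn : s.toNat % 4 = 0 := by omega
      simp [hn, PySem.List.pyGet?, PySem.List.pyIdx?]
  · by_cases hR : c = "R"
    · subst hR
      simp only [String.reduceEq, ite_self, if_true, if_false]
      rw [show (fun (p : Int × Int) (_ : Int) =>
            (if p.2 * p.1 > 0 then ((p.2 * 1, p.1 * (-1)) : Int × Int)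
             else (p.2, p.1 * (-1)))) =
          (fun (p : Int × Int) (_ : Int) => rotR p) from
        funext fun p => funext fun _ => by simp [rotR]]
      rw [foldl_const_step, hlen, rotR_iterate]
      by_cases hp : s > 0
      · have hm : s.toNat % 4 = (s % 4).toNat := by omega
        rw [if_pos hp, hm]
        have h4 : s % 4 = 0 ∨ s % 4 = 1 ∨ s % 4 = 2 ∨ s % 4 = 3 := by omega
        rcases h4 with h | h | h | h <;>
          simp [h, PySem.List.pyGet?, PySem.List.pyIdx?]
      · rw [if_neg hp]
        have hn : s.toNat % 4 = 0 := by omega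
        simp [hn, PySem.List.pyGet?, PySem.List.pyIdx?]
    · simp only [hL, hR, if_false]
      exact foldl_id _ _
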